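-- pv_equiv track=rewrite | github.com/allenai/OLMo-core | src/scripts/train/sft/Olmo-3-600M-SFT.py | _separate_prefix_and_glob
-- ===== SOURCE A (Python) =====
-- from typing import List, Optional, Tuple, cast
--
-- def _separate_prefix_and_glob(prefix: str) -> Tuple[str, str]:
--     if any(char in prefix for char in ["*", "?", "[", "]"]):
--         parts = prefix.split("/")
--         base_parts = []
--         for part in parts:
--             if any(char in part for char in ["*", "?", "[", "]"]):
--                 break
--             base_parts.append(part)
--     else:
--         base_parts = prefix.split("/")
--     if not base_parts:
--         return ".", prefix
--
--     new_prefix = "/".join(base_parts)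
--     glob_str = prefix[len(new_prefix) :]
--
--     return new_prefix, glob_str.lstrip("/")
-- ===== SOURCE B (Python) =====
-- from typing import Tuple
--
-- _GLOB_CHARS = "*?[]"
--
--
-- def _separate_prefix_and_glob(prefix: str) -> Tuple[str, str]:
--     # Single forward pass: remember the index of the last '/' seen; on the first
--     # glob character, split the string at that slash.
--     last_slash = -1
--     for i, c in enumerate(prefix):
--         if c in _GLOB_CHARS:
--             if last_slash < 0:
--                 return ".", prefix
--             return prefix[:last_slash], prefix[last_slash:].lstrip("/")
--         if c == "/":
--             last_slash = i
--     return prefix, ""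
-- ===== Notes on version B (the rewrite author's own statement) =====
-- stated objective: simpler
-- what changed: A splits the path on the slash separator into a component list and loops over the components, accumulating and re-joining a base list; B makes a single forward character scan keeping only the index of the last slash seen, and slices the string there when it meets the first glob character.
import Mathlib
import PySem

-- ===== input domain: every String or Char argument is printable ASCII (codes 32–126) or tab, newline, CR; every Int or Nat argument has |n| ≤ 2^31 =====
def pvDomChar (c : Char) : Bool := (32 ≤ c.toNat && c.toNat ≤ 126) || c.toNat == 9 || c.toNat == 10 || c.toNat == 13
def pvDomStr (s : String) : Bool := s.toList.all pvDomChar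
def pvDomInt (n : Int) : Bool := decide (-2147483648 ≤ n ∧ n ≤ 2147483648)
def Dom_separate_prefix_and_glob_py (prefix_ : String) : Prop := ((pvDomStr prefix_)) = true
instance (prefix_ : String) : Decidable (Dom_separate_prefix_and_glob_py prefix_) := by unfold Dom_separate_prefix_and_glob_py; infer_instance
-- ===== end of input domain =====

-- B replaces A's split-into-components loop by a single forward scan that keeps only the index
-- of the last '/' seen before the first glob character (objective: simpler; same return value).

-- ===== PORT A =====
-- the list ["*", "?", "[", "]"] of A (single-character strings, kept as characters)
def pvGlobChars : List Char := ['*', '?', '[', ']']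

-- A's loop 'for part in parts: if any(char in part …): break; base_parts.append(part)'
def pvBasePartsLoop : List (List Char) → List (List Char)
  | [] => []
  | p :: rest =>
    if pvGlobChars.any (fun ch => PySem.Chars.isIn [ch] p) then []
    else p :: pvBasePartsLoop rest

def separate_prefix_and_glob_py (prefix_ : String) : String × String :=
  let cs := prefix_.toList
  let base_parts :=
    if pvGlobChars.any (fun ch => PySem.Chars.isIn [ch] cs) then
      pvBasePartsLoop (PySem.Chars.splitOn cs ['/'])
    else
      PySem.Chars.splitOn cs ['/']
  if base_parts = [] then (".", prefix_)
  else
    let new_prefix := PySem.Chars.join ['/'] base_parts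
    let glob_str := PySem.List.slice cs (some (new_prefix.length : Int)) none
    -- '.lstrip("/")' is exactly dropWhile (· == '/')
    (String.ofList new_prefix, String.ofList (glob_str.dropWhile (· == '/')))

-- ===== PORT B =====
-- Source B's loop: 'for i, c in enumerate(prefix): …' with early returns
def pvAltGo (prefix_ : String) : List Char → Int → Int → String × String
  | [], _, _ => (prefix_, "")
  | c :: rest, i, last_slash =>
    if PySem.Chars.isIn [c] "*?[]".toList then   -- 'c in _GLOB_CHARS' (single character)
      if last_slash < 0 then (".", prefix_)
      else
        (String.ofList (PySem.List.slice prefix_.toList none (some last_slash)),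
         -- '.lstrip("/")' is exactly dropWhile (· == '/')
         String.ofList ((PySem.List.slice prefix_.toList (some last_slash) none).dropWhile (· == '/')))
    else
      pvAltGo prefix_ rest (i + 1) (if c = '/' then i else last_slash)

def separate_prefix_and_glob_py_alt (prefix_ : String) : String × String :=
  pvAltGo prefix_ prefix_.toList 0 (-1)

-- ===== PRECONDITION & SPEC =====
def Spec_separate_prefix_and_glob_py (prefix_ : String) (out : String × String) : Prop := out = separate_prefix_and_glob_py_alt prefix_
instance (prefix_ : String) (out : String × String) : Decidable (Spec_separate_prefix_and_glob_py prefix_ out) := by unfold Spec_separate_prefix_and_glob_py; infer_instance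

-- ===== CLAIM (what is proved, stated in full; the proofs are below) =====
def Claim_equal_separate_prefix_and_glob_py : Prop := ∀ (prefix_ : String), Dom_separate_prefix_and_glob_py prefix_ → Spec_separate_prefix_and_glob_py prefix_ (separate_prefix_and_glob_py prefix_)

-- ===== LEMMAS AND PROOFS =====

-- a glob character
def pvG (c : Char) : Bool := c = '*' || c = '?' || c = '[' || c = ']'

-- clean recursion equivalent to PySem.Chars.splitOn · ['/']
def pvMySplit (cur : List Char) : List Char → List (List Char)
  | [] => [cur]
  | c :: rest => if c = '/' then cur :: pvMySplit [] rest else pvMySplit (cur ++ [c]) rest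

-- everything before the last '/' of w (only used when '/' ∈ w)
def pvCut (w : List Char) : List Char := ((w.reverse.dropWhile (fun c => c != '/')).tail).reverse

-- B's running last_slash value after consuming w
def pvLS (w : List Char) : Int := if '/' ∈ w then ((pvCut w).length : Int) else -1

-- the common closed form both ports compute
def pvSpec (prefix_ : String) : String × String :=
  let cs := prefix_.toList
  if cs.any pvG then
    let pre := cs.takeWhile (fun c => !pvG c)
    if '/' ∈ pre then
      let b := pvCut pre
      (String.ofList b, String.ofList ((cs.drop b.length).dropWhile (· == '/')))
    else (".", prefix_)
  else (prefix_, "")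

theorem pv_isIn_singleton (a : Char) (s : List Char) :
    PySem.Chars.isIn [a] s = s.contains a := by
  rw [Bool.eq_iff_iff, PySem.Chars.isIn_iff_infix]
  constructor
  · intro h
    have hm : a ∈ s := (List.singleton_sublist).mp h.sublist
    simpa using hm
  · intro h
    have hm : a ∈ s := by simpa using h
    obtain ⟨p, q, rfl⟩ := List.append_of_mem hm
    exact ⟨p, q, by simp⟩

theorem pv_contains_glob (c : Char) :
    (['*', '?', '[', ']'] : List Char).contains c = pvG c := by
  rw [Bool.eq_iff_iff]
  simp [pvG]
  tauto

theorem pv_glob_any (s : List Char) :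
    pvGlobChars.any (fun ch => PySem.Chars.isIn [ch] s) = s.any pvG := by
  rw [Bool.eq_iff_iff]
  simp only [List.any_eq_true, pv_isIn_singleton, List.contains_iff_mem]
  constructor
  · rintro ⟨ch, hch, hmem⟩
    refine ⟨ch, hmem, ?_⟩
    simp only [pvGlobChars, List.mem_cons, List.not_mem_nil, or_false] at hch
    rcases hch with rfl | rfl | rfl | rfl <;> decide
  · rintro ⟨c, hc, h⟩
    refine ⟨c, ?_, hc⟩
    simp only [pvG, Bool.or_eq_true, decide_eq_true_eq] at h
    simp only [pvGlobChars, List.mem_cons, List.not_mem_nil, or_false]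
    tauto

theorem pv_test_eq (c : Char) :
    PySem.Chars.isIn [c] "*?[]".toList = pvG c := by
  rw [pv_isIn_singleton, show "*?[]".toList = ['*', '?', '[', ']'] from by decide,
    pv_contains_glob]

theorem pvMySplit_ne_nil (cur cs : List Char) : pvMySplit cur cs ≠ [] := by
  induction cs generalizing cur with
  | nil => simp [pvMySplit]
  | cons c rest ih =>
    by_cases h : c = '/' <;> simp [pvMySplit, h, ih]

theorem pv_go_eq (fuel : Nat) : ∀ (l cur : List Char) (acc : List (List Char)),
    l.length < fuel →
    PySem.Chars.splitOn.go ['/'] fuel l cur acc = acc.reverse ++ pvMySplit cur.reverse l := by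
  induction fuel with
  | zero => intro l cur acc h; omega
  | succ n ih =>
    intro l cur acc h
    match l with
    | [] =>
      rw [PySem.Chars.splitOn.go.eq_def]
      simp [pvMySplit]
    | c :: rest =>
      rw [PySem.Chars.splitOn.go.eq_def]
      by_cases hc : c = '/'
      · subst hc
        have hp : (['/'] : List Char).isPrefixOf ('/' :: rest) = true := by simp
        simp only [hp, if_true]
        rw [show List.drop (['/'] : List Char).length ('/' :: rest) = rest from by simp]
        rw [ih rest [] (cur.reverse :: acc) (by simp at h; omega)]
        simp [pvMySplit]
      · have hp : (['/'] : List Char).isPrefixOf (c :: rest) = false := by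
          simp [List.isPrefixOf, Ne.symm hc]
        simp only [hp, Bool.false_eq_true, if_false]
        rw [ih rest (c :: cur) acc (by simp at h; omega)]
        simp [pvMySplit, hc]

theorem pv_splitOn_eq (cs : List Char) :
    PySem.Chars.splitOn cs ['/'] = pvMySplit [] cs := by
  unfold PySem.Chars.splitOn
  rw [pv_go_eq (cs.length + 1) cs [] [] (by omega)]
  simp

theorem pv_join_mySplit (cs : List Char) : ∀ cur,
    PySem.Chars.join ['/'] (pvMySplit cur cs) = cur ++ cs := by
  induction cs with
  | nil => intro cur; simp [pvMySplit, PySem.Chars.join_singleton]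
  | cons c rest ih =>
    intro cur
    by_cases h : c = '/'
    · subst h
      rw [show pvMySplit cur ('/' :: rest) = cur :: pvMySplit [] rest from by simp [pvMySplit]]
      obtain ⟨hd, tl, he⟩ : ∃ hd tl, pvMySplit ([] : List Char) rest = hd :: tl := by
        cases hm : pvMySplit ([] : List Char) rest with
        | nil => exact absurd hm (pvMySplit_ne_nil _ _)
        | cons a b => exact ⟨a, b, rfl⟩
      rw [he, PySem.Chars.join_cons_cons, ← he, ih []]
      simp
    · simp only [pvMySplit, if_neg h]
      rw [ih (cur ++ [c])]
      simp

theorem pvMySplit_head (cs : List Char) : ∀ cur, ∃ z tl, pvMySplit cur cs = (cur ++ z) :: tl := by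
  induction cs with
  | nil => intro cur; exact ⟨[], [], by simp [pvMySplit]⟩
  | cons c rest ih =>
    intro cur
    by_cases h : c = '/'
    · subst h; exact ⟨[], pvMySplit [] rest, by simp [pvMySplit]⟩
    · obtain ⟨z, tl, hz⟩ := ih (cur ++ [c])
      exact ⟨c :: z, tl, by simp [pvMySplit, h, hz]⟩

theorem pv_loop_glob_cur (cs cur : List Char) (h : cur.any pvG = true) :
    pvBasePartsLoop (pvMySplit cur cs) = [] := by
  obtain ⟨z, tl, hz⟩ := pvMySplit_head cs cur
  rw [hz]
  simp [pvBasePartsLoop, pv_glob_any, List.any_append, h]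

-- last-slash decomposition and its uniqueness
theorem pvCut_of_decomp (b t : List Char) (ht : '/' ∉ t) : pvCut (b ++ '/' :: t) = b := by
  unfold pvCut
  have h1 : (b ++ '/' :: t).reverse = t.reverse ++ '/' :: b.reverse := by simp
  rw [h1, List.dropWhile_append]
  have h2 : List.dropWhile (fun c => c != '/') t.reverse = [] := by
    rw [List.dropWhile_eq_nil_iff]
    intro x hx
    have : x ≠ '/' := by
      intro hEq; subst hEq; exact ht (by simpa using hx)
    simp [this]
  simp [h2, List.dropWhile_cons]

theorem pvCut_spec (w : List Char) (h : '/' ∈ w) :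
    ∃ t, '/' ∉ t ∧ w = pvCut w ++ '/' :: t := by
  induction w with
  | nil => cases h
  | cons c p ih =>
    by_cases hp : '/' ∈ p
    · obtain ⟨t, ht, he⟩ := ih hp
      have hc : pvCut (c :: p) = c :: pvCut p := by
        conv_lhs => rw [he]
        rw [show c :: (pvCut p ++ '/' :: t) = (c :: pvCut p) ++ '/' :: t from by simp,
          pvCut_of_decomp _ _ ht]
      refine ⟨t, ht, ?_⟩
      rw [hc]
      conv_lhs => rw [he]
      simp
    · have hc : c = '/' := by
        rcases List.mem_cons.mp h with h' | h'
        · exact h'.symm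
        · exact absurd h' hp
      subst hc
      have : pvCut ('/' :: p) = [] := by
        have := pvCut_of_decomp [] p hp
        simpa using this
      exact ⟨p, hp, by rw [this]; simp⟩

theorem pvCut_cons (c : Char) (p : List Char) (hp : '/' ∈ p) :
    pvCut (c :: p) = c :: pvCut p := by
  obtain ⟨t, ht, he⟩ := pvCut_spec p hp
  conv_lhs => rw [he]
  rw [show c :: (pvCut p ++ '/' :: t) = (c :: pvCut p) ++ '/' :: t from by simp,
    pvCut_of_decomp _ _ ht]

theorem pvLS_append (w : List Char) (c : Char) :
    pvLS (w ++ [c]) = if c = '/' then (w.length : Int) else pvLS w := by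
  by_cases hc : c = '/'
  · subst hc
    have hcut : pvCut (w ++ ['/']) = w := by
      have := pvCut_of_decomp w [] (by simp)
      simpa using this
    simp [pvLS, hcut]
  · by_cases hw : '/' ∈ w
    · obtain ⟨t, ht, he⟩ := pvCut_spec w hw
      have ht' : '/' ∉ t ++ [c] := by
        intro hmem
        rcases List.mem_append.mp hmem with h' | h'
        · exact ht h'
        · exact hc (List.mem_singleton.mp h').symm
      have hcut : pvCut (w ++ [c]) = pvCut w := by
        conv_lhs => rw [he]
        rw [show (pvCut w ++ '/' :: t) ++ [c] = pvCut w ++ '/' :: (t ++ [c]) from by simp,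
          pvCut_of_decomp _ _ ht']
      simp [pvLS, hw, hc, hcut]
    · have hw' : '/' ∉ w ++ [c] := by
        intro hmem
        rcases List.mem_append.mp hmem with h' | h'
        · exact hw h'
        · exact hc (List.mem_singleton.mp h').symm
      simp [pvLS, hw, hc, hw']

theorem pv_ne_slash_of_glob (c : Char) (h : pvG c = true) : c ≠ '/' := by
  intro hEq; subst hEq; exact absurd h (by decide)

-- the main A-side invariant (glob present in cs)
theorem pvA_main (cs : List Char) : ∀ cur, cur.any pvG = false → cs.any pvG = true →
    (if '/' ∈ cs.takeWhile (fun c => !pvG c) then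
      pvBasePartsLoop (pvMySplit cur cs) ≠ [] ∧
        PySem.Chars.join ['/'] (pvBasePartsLoop (pvMySplit cur cs))
          = cur ++ pvCut (cs.takeWhile (fun c => !pvG c))
    else pvBasePartsLoop (pvMySplit cur cs) = []) := by
  induction cs with
  | nil => intro cur hcur hglob; simp at hglob
  | cons c rest ih =>
    intro cur hcur hglob
    by_cases hgc : pvG c = true
    · have hpre : (c :: rest).takeWhile (fun x => !pvG x) = [] := by
        simp [List.takeWhile_cons, hgc]
      rw [hpre]
      rw [if_neg (List.not_mem_nil)]
      have hc' : c ≠ '/' := pv_ne_slash_of_glob c hgc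
      have hsplit : pvMySplit cur (c :: rest) = pvMySplit (cur ++ [c]) rest := by
        simp [pvMySplit, hc']
      rw [hsplit]
      exact pv_loop_glob_cur _ _ (by simp [List.any_append, hgc])
    · have hgc' : pvG c = false := by simpa using hgc
      have hglob' : rest.any pvG = true := by
        simp only [List.any_cons, hgc', Bool.false_or] at hglob
        exact hglob
      by_cases hslash : c = '/'
      · subst hslash
        have hpre : ('/' :: rest).takeWhile (fun x => !pvG x)
            = '/' :: rest.takeWhile (fun x => !pvG x) := by
          simp [List.takeWhile_cons, hgc']
        rw [hpre, if_pos (List.mem_cons_self ..)]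
        have hsplit : pvMySplit cur ('/' :: rest) = cur :: pvMySplit [] rest := by
          simp [pvMySplit]
        have ihr := ih [] (by simp) hglob'
        have hloop : pvBasePartsLoop (pvMySplit cur ('/' :: rest))
            = cur :: pvBasePartsLoop (pvMySplit [] rest) := by
          rw [hsplit]
          simp [pvBasePartsLoop, pv_glob_any, hcur]
        by_cases hsr : '/' ∈ rest.takeWhile (fun x => !pvG x)
        · rw [if_pos hsr] at ihr
          obtain ⟨hne, hjoin⟩ := ihr
          refine ⟨by simp [hloop], ?_⟩
          rw [hloop]
          obtain ⟨hd, tl, he⟩ : ∃ hd tl, pvBasePartsLoop (pvMySplit [] rest) = hd :: tl := by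
            cases hm : pvBasePartsLoop (pvMySplit [] rest) with
            | nil => exact absurd hm hne
            | cons a b => exact ⟨a, b, rfl⟩
          rw [he, PySem.Chars.join_cons_cons, ← he, hjoin]
          rw [pvCut_cons '/' _ hsr]
          simp
        · rw [if_neg hsr] at ihr
          refine ⟨by simp [hloop], ?_⟩
          rw [hloop, ihr, PySem.Chars.join_singleton]
          have hcut : pvCut ('/' :: rest.takeWhile (fun x => !pvG x)) = [] := by
            have := pvCut_of_decomp [] _ hsr
            simpa using this
          simp [hcut]
      · have hpre : (c :: rest).takeWhile (fun x => !pvG x)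
            = c :: rest.takeWhile (fun x => !pvG x) := by
          simp [List.takeWhile_cons, hgc']
        rw [hpre]
        have hsplit : pvMySplit cur (c :: rest) = pvMySplit (cur ++ [c]) rest := by
          simp [pvMySplit, hslash]
        rw [hsplit]
        have ihr := ih (cur ++ [c]) (by simp [List.any_append, hcur, hgc']) hglob'
        by_cases hsr : '/' ∈ rest.takeWhile (fun x => !pvG x)
        · rw [if_pos (List.mem_cons_of_mem _ hsr)]
          rw [if_pos hsr] at ihr
          obtain ⟨hne, hjoin⟩ := ihr
          refine ⟨hne, ?_⟩
          rw [hjoin, pvCut_cons c _ hsr]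
          simp
        · have hmem : '/' ∉ c :: rest.takeWhile (fun x => !pvG x) := by
            simp [hslash, hsr]
            intro h'; exact absurd h'.symm hslash
          rw [if_neg hmem]
          rw [if_neg hsr] at ihr
          exact ihr

theorem pvA_eq_spec (prefix_ : String) : separate_prefix_and_glob_py prefix_ = pvSpec prefix_ := by
  unfold separate_prefix_and_glob_py pvSpec
  simp only [pv_glob_any, pv_splitOn_eq]
  by_cases hg : prefix_.toList.any pvG = true
  · rw [if_pos hg, if_pos hg]
    have hmain := pvA_main prefix_.toList [] (by simp) hg
    by_cases hs : '/' ∈ prefix_.toList.takeWhile (fun c => !pvG c)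
    · rw [if_pos hs] at hmain
      obtain ⟨hne, hjoin⟩ := hmain
      rw [if_pos hs, if_neg hne, hjoin]
      simp only [List.nil_append]
      rw [PySem.List.slice_from_natCast]
    · rw [if_neg hs] at hmain
      rw [if_neg hs, if_pos hmain]
  · have hg' : prefix_.toList.any pvG = false := by simpa using hg
    rw [if_neg (show ¬ prefix_.toList.any pvG = true by simp [hg'])]
    rw [if_neg (pvMySplit_ne_nil [] prefix_.toList)]
    rw [if_neg (show ¬ prefix_.toList.any pvG = true by simp [hg'])]
    rw [pv_join_mySplit prefix_.toList []]
    simp only [List.nil_append]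
    rw [PySem.List.slice_from_natCast, List.drop_length]
    simp [String.ofList_toList]

-- the main B-side invariant
theorem pvB_main (cs : List Char) : ∀ w (prefix_ : String), prefix_.toList = w ++ cs →
    w.any pvG = false →
    pvAltGo prefix_ cs (w.length : Int) (pvLS w) = pvSpec prefix_ := by
  induction cs with
  | nil =>
    intro w prefix_ hpre hw
    have hfull : prefix_.toList.any pvG = false := by rw [hpre]; simpa using hw
    simp [pvAltGo, pvSpec, hfull]
  | cons c rest ih =>
    intro w prefix_ hpre hw
    by_cases hgc : pvG c = true
    · have htest : PySem.Chars.isIn [c] "*?[]".toList = true := by rw [pv_test_eq]; exact hgc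
      have hwall : ∀ x ∈ w, pvG x = false := by
        intro x hx
        by_contra h'
        have : w.any pvG = true := List.any_eq_true.mpr ⟨x, hx, by simpa using h'⟩
        simp [this] at hw
      have hgfull : prefix_.toList.any pvG = true := by
        rw [hpre]; simp [List.any_append, hgc]
      have htw : prefix_.toList.takeWhile (fun x => !pvG x) = w := by
        rw [hpre, List.takeWhile_append]
        have hself : w.takeWhile (fun x => !pvG x) = w :=
          List.takeWhile_eq_self_iff.mpr (by intro x hx; simp [hwall x hx])
        rw [if_pos (by rw [hself])]
        simp [List.takeWhile_cons, hgc]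
      rw [show pvAltGo prefix_ (c :: rest) (w.length : Int) (pvLS w)
            = if PySem.Chars.isIn [c] "*?[]".toList then
                if pvLS w < 0 then (".", prefix_)
                else (String.ofList (PySem.List.slice prefix_.toList none (some (pvLS w))),
                  String.ofList ((PySem.List.slice prefix_.toList (some (pvLS w)) none).dropWhile (· == '/')))
              else pvAltGo prefix_ rest ((w.length : Int) + 1) (if c = '/' then (w.length : Int) else pvLS w)
          from rfl]
      rw [if_pos htest]
      unfold pvSpec
      rw [if_pos hgfull, htw]
      by_cases hslash : '/' ∈ w
      · obtain ⟨t, ht, he⟩ := pvCut_spec w hslash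
        have hls : pvLS w = ((pvCut w).length : Int) := by simp [pvLS, hslash]
        rw [if_pos hslash, hls]
        rw [if_neg (by omega : ¬ (((pvCut w).length : Int) < 0))]
        have hdecomp : prefix_.toList = pvCut w ++ ('/' :: t ++ c :: rest) := by
          rw [hpre]
          conv_lhs => rw [he]
          simp
        have hslice1 : PySem.List.slice prefix_.toList none (some ((pvCut w).length : Int))
            = pvCut w := by
          rw [PySem.List.slice_to _ (by omega), Int.toNat_natCast, hdecomp, List.take_left]
        have hslice2 : PySem.List.slice prefix_.toList (some ((pvCut w).length : Int)) none
            = List.drop (pvCut w).length prefix_.toList := PySem.List.slice_from_natCast _ _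
        rw [hslice1, hslice2]
      · have hls : pvLS w = -1 := by simp [pvLS, hslash]
        rw [if_neg hslash, hls, if_pos (by norm_num)]
    · have hgc' : pvG c = false := by simpa using hgc
      have htest : PySem.Chars.isIn [c] "*?[]".toList = false := by rw [pv_test_eq]; exact hgc'
      rw [show pvAltGo prefix_ (c :: rest) (w.length : Int) (pvLS w)
            = if PySem.Chars.isIn [c] "*?[]".toList then
                if pvLS w < 0 then (".", prefix_)
                else (String.ofList (PySem.List.slice prefix_.toList none (some (pvLS w))),
                  String.ofList ((PySem.List.slice prefix_.toList (some (pvLS w)) none).dropWhile (· == '/')))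
              else pvAltGo prefix_ rest ((w.length : Int) + 1) (if c = '/' then (w.length : Int) else pvLS w)
          from rfl]
      rw [if_neg (show ¬ PySem.Chars.isIn [c] "*?[]".toList = true by
        rw [htest]; exact Bool.false_ne_true)]
      have hrec := ih (w ++ [c]) prefix_ (by rw [hpre]; simp)
        (by simp [List.any_append, hw, hgc'])
      rw [pvLS_append] at hrec
      have hlen : ((w ++ [c]).length : Int) = (w.length : Int) + 1 := by simp
      rw [hlen] at hrec
      exact hrec

theorem pvB_eq_spec (prefix_ : String) :
    separate_prefix_and_glob_py_alt prefix_ = pvSpec prefix_ := by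
  unfold separate_prefix_and_glob_py_alt
  have := pvB_main prefix_.toList [] prefix_ (by simp) (by simp)
  simpa [pvLS] using this

-- ===== VERDICT (by name: the statement is the Claim_ definition above) =====
theorem separate_prefix_and_glob_py_spec : Claim_equal_separate_prefix_and_glob_py := by
  intro prefix_ _
  unfold Spec_separate_prefix_and_glob_py
  rw [pvA_eq_spec, pvB_eq_spec]
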